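-- pv_equiv track=rewrite | github.com/ydb-platform/ydb | contrib/python/telnetlib3/telnetlib3/server_shell.py | character_dump
-- ===== SOURCE A (Python) =====
-- from typing import Union, Optional, Generator, cast
--
-- def character_dump(kb_limit: int) -> Generator[str, None, None]:
--     """Generate character dump output up to kb_limit kilobytes."""
--     num_bytes = 0
--     while (num_bytes) < (kb_limit * 1024):
--         for char in ("/", "\\"):
--             lineout = (char * 80) + "\033[1G"
--             yield lineout
--             num_bytes += len(lineout)
--     yield "\033[1G" + "wrote " + str(num_bytes) + " bytes"
-- ===== SOURCE B (Python) =====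
-- def character_dump(kb_limit):
--     """Generate character dump output up to kb_limit kilobytes."""
--     line1 = "/" * 80 + "\033[1G"
--     line2 = "\\" * 80 + "\033[1G"
--     n = max(0, -(-(kb_limit * 1024) // 168))
--     yield from [line1, line2] * n
--     yield "\033[1G" + "wrote " + str(n * 168) + " bytes"
-- ===== Notes on version B (the rewrite author's own statement) =====
-- stated objective: alternative
-- what changed: B precomputes the number of loop iterations up front as a closed-form ceiling division of the byte limit by the per-iteration output size (clamped at zero), then emits the two dump lines that many times and the byte-count trailer, instead of A's while-loop that accumulates a byte counter and re-tests it against the limit each pass.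
import Mathlib
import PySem

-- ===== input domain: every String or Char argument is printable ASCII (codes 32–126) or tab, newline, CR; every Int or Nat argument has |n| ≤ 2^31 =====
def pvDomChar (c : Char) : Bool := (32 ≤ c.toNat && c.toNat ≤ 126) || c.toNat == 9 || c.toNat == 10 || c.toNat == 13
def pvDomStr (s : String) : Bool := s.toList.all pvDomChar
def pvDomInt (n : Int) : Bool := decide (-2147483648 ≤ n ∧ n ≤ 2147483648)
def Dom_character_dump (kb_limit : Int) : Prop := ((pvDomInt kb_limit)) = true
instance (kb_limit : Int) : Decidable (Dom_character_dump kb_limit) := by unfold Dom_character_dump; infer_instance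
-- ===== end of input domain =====

-- B replaces A's run-time byte-counter termination test by a closed-form iteration count
-- (alternative decomposition; same asymptotic cost). The generator is ported as the list
-- of its yielded values.

-- ===== PORT A =====
def pvEsc : String := "\x1B[1G"
-- char * 80 + "\033[1G" for char = '/' and '\\'
def pvSlashLine : String := String.ofList (List.replicate 80 '/') ++ pvEsc
def pvBackLine : String := String.ofList (List.replicate 80 '\\') ++ pvEsc

-- A's while loop; the inner for-loop over the constant 2-tuple ("/", "\\") is unrolled,
-- and len(lineout) is the constant 84 (80 chars + the 4-char escape).
def character_dump_loop (limit nb : Int) : List String :=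
  if _h : nb < limit then
    pvSlashLine :: pvBackLine :: character_dump_loop limit (nb + 84 + 84)
  else
    [pvEsc ++ "wrote " ++ PySem.Int.toStr nb ++ " bytes"]
termination_by (limit - nb).toNat
decreasing_by omega

def character_dump (kb_limit : Int) : List String :=
  character_dump_loop (kb_limit * 1024) 0

-- ===== PORT B =====
def character_dump_alt (kb_limit : Int) : List String :=
  let n : Int := max 0 (-(PySem.Int.floordiv (-(kb_limit * 1024)) 168))
  (List.replicate n.toNat [pvSlashLine, pvBackLine]).flatten
    ++ [pvEsc ++ "wrote " ++ PySem.Int.toStr (n * 168) ++ " bytes"]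

-- ===== PRECONDITION & SPEC =====
def Spec_character_dump (kb_limit : Int) (out : List String) : Prop := out = character_dump_alt kb_limit
instance (kb_limit : Int) (out : List String) : Decidable (Spec_character_dump kb_limit out) := by unfold Spec_character_dump; infer_instance

-- ===== CLAIM (what is proved, stated in full; the proofs are below) =====
def Claim_equal_character_dump : Prop := ∀ (kb_limit : Int), Dom_character_dump kb_limit → Spec_character_dump kb_limit (character_dump kb_limit)

-- ===== LEMMAS AND PROOFS =====

-- exact number of remaining loop iterations: ceil((limit - nb)/168), clamped at 0
def pvCnt (limit nb : Int) : Nat := ((limit - nb + 167) / 168).toNat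

lemma character_dump_loop_eq (k : Nat) : ∀ (limit nb : Int), (limit - nb).toNat ≤ 168 * k →
    character_dump_loop limit nb =
      (List.replicate (pvCnt limit nb) [pvSlashLine, pvBackLine]).flatten
        ++ [pvEsc ++ "wrote " ++ PySem.Int.toStr (nb + 168 * (pvCnt limit nb : Int)) ++ " bytes"] := by
  induction k with
  | zero =>
      intro limit nb h
      have hle : limit ≤ nb := by omega
      have hc : pvCnt limit nb = 0 := by unfold pvCnt; omega
      rw [character_dump_loop]
      simp [hle.not_gt, hc]
  | succ k ih =>
      intro limit nb h
      rw [character_dump_loop]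
      by_cases hlt : nb < limit
      · have hc : pvCnt limit nb = pvCnt limit (nb + 84 + 84) + 1 := by
          unfold pvCnt; omega
        rw [ih limit (nb + 84 + 84) (by omega)]
        simp only [hc, List.replicate_succ, List.flatten_cons, dif_pos hlt]
        have harith : (nb + 84 + 84) + 168 * ((pvCnt limit (nb + 84 + 84) : Int))
            = nb + 168 * ((pvCnt limit (nb + 84 + 84) : Int) + 1) := by ring
        push_cast
        rw [harith]
        simp
      · have hc : pvCnt limit nb = 0 := by unfold pvCnt; omega
        simp [hlt, hc]

lemma alt_count (kb_limit : Int) :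
    max 0 (-(PySem.Int.floordiv (-(kb_limit * 1024)) 168)) = (pvCnt (kb_limit * 1024) 0 : Int) := by
  rw [PySem.Int.floordiv_eq_ediv_of_pos (by omega : (0:Int) < 168)]
  unfold pvCnt
  omega

-- ===== VERDICT (by name: the statement is the Claim_ definition above) =====
theorem character_dump_spec : Claim_equal_character_dump := by
  intro kb_limit _
  unfold Spec_character_dump character_dump character_dump_alt
  rw [character_dump_loop_eq (kb_limit * 1024).toNat (kb_limit * 1024) 0 (by omega)]
  rw [alt_count]
  norm_num [Int.mul_comm]
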